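-- pv_equiv track=rewrite | github.com/gamershousestudio/Gene-Detector | main.py | stop_distribution
-- ===== SOURCE A (Python) =====
-- def stop_distribution(potential_genes, bases, confidence_factor_negative):
--     confidence = [0 for i in range(len(potential_genes))]
--
--     # Stop codon distribution
--     taa = 0
--     tag = 0
--     tga = 0
--     for start, stop in potential_genes:
--         if bases[stop - 3:stop] == "TAA":
--             taa += 1
--         elif bases[stop - 3:stop] == "TAG":
--             tag += 1
--         elif bases[stop - 3:stop] == "TGA":
--             tga += 1
--
--     # Subtract score from genes ending with the least common stop codon
--     if min(taa, tag, tga) == taa: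
--         for i, (start, stop) in enumerate(potential_genes):
--             if bases[stop - 3:stop] == "TAA":
--                 confidence[i] -= confidence_factor_negative
--     elif min(taa, tag, tga) == tga:
--         for i, (start, stop) in enumerate(potential_genes):
--             if bases[stop - 3:stop] == "TGA":
--                 confidence[i] -= confidence_factor_negative
--     elif min(taa, tag, tga) == tag:
--         for i, (start, stop) in enumerate(potential_genes):
--             if bases[stop - 3:stop] == "TAG":
--                 confidence[i] -= confidence_factor_negative
--
--     return confidence
-- ===== SOURCE B (Python) =====
-- def stop_distribution(potential_genes, bases, confidence_factor_negative):
--     # One pass: record, per stop codon, the list of gene indices ending with it;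
--     # then scatter-write the penalty at the indices of the least-populated codon.
--     taa_idx, tga_idx, tag_idx = [], [], []
--     for i, (_, stop) in enumerate(potential_genes):
--         c = bases[stop - 3:stop]
--         if c == "TAA":
--             taa_idx.append(i)
--         elif c == "TGA":
--             tga_idx.append(i)
--         elif c == "TAG":
--             tag_idx.append(i)
--     # first minimal wins: TAA, then TGA, then TAG (A's if/elif tie order)
--     chosen = min((taa_idx, tga_idx, tag_idx), key=len)
--     out = [0] * len(potential_genes)
--     for i in chosen:
--         out[i] = -confidence_factor_negative
--     return out
-- ===== Notes on version B (the rewrite author's own statement) =====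
-- stated objective: alternative
-- what changed: B builds, in a single pass, per-codon index lists (an inverted index from stop codon to gene positions), selects the least-populated list (min by len, first-minimal ties = A's if/elif order) and scatter-writes the penalty at those indices into a zero list, instead of A's count-then-rescan structure that re-slices bases and re-matches every codon in a second enumerate pass.
import Mathlib
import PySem

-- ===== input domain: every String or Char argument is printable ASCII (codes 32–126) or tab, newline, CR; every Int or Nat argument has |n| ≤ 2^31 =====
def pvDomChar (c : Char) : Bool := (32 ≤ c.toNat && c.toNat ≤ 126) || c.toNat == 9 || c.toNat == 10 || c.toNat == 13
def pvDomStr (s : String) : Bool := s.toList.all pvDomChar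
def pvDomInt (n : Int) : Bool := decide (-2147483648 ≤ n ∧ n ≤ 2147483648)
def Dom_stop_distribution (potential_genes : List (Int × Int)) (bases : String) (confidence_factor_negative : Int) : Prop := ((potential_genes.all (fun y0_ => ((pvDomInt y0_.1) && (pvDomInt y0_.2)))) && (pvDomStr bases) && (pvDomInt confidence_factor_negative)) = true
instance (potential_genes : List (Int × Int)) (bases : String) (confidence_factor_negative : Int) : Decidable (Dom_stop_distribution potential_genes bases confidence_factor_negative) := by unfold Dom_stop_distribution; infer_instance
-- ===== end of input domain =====

-- B builds per-codon index lists in one pass and scatter-writes the penalty at the indices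
-- of the least-populated codon (min by len, first-minimal = A's tie order), instead of A's
-- count-then-rescan passes. Objective: alternative (same O(n) cost, different shape).

-- ===== PORT A =====
-- bases[stop-3:stop], as a list of code points (PySem slice = Python slice, exact)
def pvCodon (bases : String) (stop : Int) : List Char :=
  PySem.List.slice bases.toList (some (stop - 3)) (some stop)

-- one step of A's counting loop over (taa, tag, tga)
def pvStepCount (bases : String) (c : Int × Int × Int) (p : Int × Int) : Int × Int × Int :=
  if pvCodon bases p.2 = "TAA".toList then (c.1 + 1, c.2.1, c.2.2)
  else if pvCodon bases p.2 = "TAG".toList then (c.1, c.2.1 + 1, c.2.2)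
  else if pvCodon bases p.2 = "TGA".toList then (c.1, c.2.1, c.2.2 + 1)
  else c

-- one step of A's penalising loops (confidence[i] -= confidence_factor_negative)
def pvPenalize (bases : String) (cfn : Int) (target : List Char)
    (conf : List Int) (ip : Int × (Int × Int)) : List Int :=
  if pvCodon bases ip.2.2 = target then conf.modify ip.1.toNat (· - cfn) else conf

def stop_distribution (potential_genes : List (Int × Int)) (bases : String) (confidence_factor_negative : Int) : List Int :=
  let confidence : List Int := potential_genes.map (fun _ => 0)
  let cnt := potential_genes.foldl (pvStepCount bases) (0, 0, 0)
  let taa := cnt.1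
  let tag := cnt.2.1
  let tga := cnt.2.2
  if min taa (min tag tga) = taa then
    (PySem.List.enumerate potential_genes).foldl (pvPenalize bases confidence_factor_negative "TAA".toList) confidence
  else if min taa (min tag tga) = tga then
    (PySem.List.enumerate potential_genes).foldl (pvPenalize bases confidence_factor_negative "TGA".toList) confidence
  else if min taa (min tag tga) = tag then
    (PySem.List.enumerate potential_genes).foldl (pvPenalize bases confidence_factor_negative "TAG".toList) confidence
  else confidence

-- ===== PORT B =====
-- B's single indexing pass: append index i to the list of its stop codon
def pvScan (bases : String) (st : List Int × List Int × List Int) (ip : Int × (Int × Int)) :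
    List Int × List Int × List Int :=
  let c := pvCodon bases ip.2.2
  if c = "TAA".toList then (st.1 ++ [ip.1], st.2.1, st.2.2)
  else if c = "TGA".toList then (st.1, st.2.1 ++ [ip.1], st.2.2)
  else if c = "TAG".toList then (st.1, st.2.1, st.2.2 ++ [ip.1])
  else st

def stop_distribution_alt (potential_genes : List (Int × Int)) (bases : String) (confidence_factor_negative : Int) : List Int :=
  let idx := (PySem.List.enumerate potential_genes).foldl (pvScan bases) ([], [], [])
  -- min((taa_idx, tga_idx, tag_idx), key=len): first minimal wins
  let chosen :=
    if idx.1.length ≤ idx.2.1.length ∧ idx.1.length ≤ idx.2.2.length then idx.1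
    else if idx.2.1.length ≤ idx.2.2.length then idx.2.1
    else idx.2.2
  let out : List Int := potential_genes.map (fun _ => 0)
  chosen.foldl (fun o i => o.set i.toNat (-confidence_factor_negative)) out

-- ===== PRECONDITION & SPEC =====
def Spec_stop_distribution (potential_genes : List (Int × Int)) (bases : String) (confidence_factor_negative : Int) (out : List Int) : Prop := out = stop_distribution_alt potential_genes bases confidence_factor_negative
instance (potential_genes : List (Int × Int)) (bases : String) (confidence_factor_negative : Int) (out : List Int) : Decidable (Spec_stop_distribution potential_genes bases confidence_factor_negative out) := by unfold Spec_stop_distribution; infer_instance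

-- ===== CLAIM (what is proved, stated in full; the proofs are below) =====
def Claim_equal_stop_distribution : Prop := ∀ (potential_genes : List (Int × Int)) (bases : String) (confidence_factor_negative : Int), Dom_stop_distribution potential_genes bases confidence_factor_negative → Spec_stop_distribution potential_genes bases confidence_factor_negative (stop_distribution potential_genes bases confidence_factor_negative)

-- ===== LEMMAS AND PROOFS =====

-- positions (starting at n) of the elements of cod equal to key
def pvIdxs (cod : List (List Char)) (key : List Char) (n : Int) : List Int :=
  match cod with
  | [] => []
  | c :: r => if c = key then n :: pvIdxs r key (n + 1) else pvIdxs r key (n + 1)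

lemma pvIdxs_length (cod : List (List Char)) (key : List Char) :
    ∀ n, (pvIdxs cod key n).length = cod.count key := by
  induction cod with
  | nil => simp [pvIdxs]
  | cons c r ih =>
    intro n
    by_cases h : c = key <;>
      simp [pvIdxs, h, ih]

-- A's counting loop computes the three codon counts of the codon list.
lemma countA (bases : String) (pg : List (Int × Int)) : ∀ (a g t : Int),
    pg.foldl (pvStepCount bases) (a, g, t) =
      (a + ((pg.map (fun p => pvCodon bases p.2)).count ['T','A','A'] : Int),
       g + ((pg.map (fun p => pvCodon bases p.2)).count ['T','A','G'] : Int),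
       t + ((pg.map (fun p => pvCodon bases p.2)).count ['T','G','A'] : Int)) := by
  induction pg with
  | nil => simp
  | cons p rest ih =>
    intro a g t
    simp only [List.foldl_cons, List.map_cons, pvStepCount,
      show "TAA".toList = ['T','A','A'] from rfl,
      show "TAG".toList = ['T','A','G'] from rfl,
      show "TGA".toList = ['T','G','A'] from rfl]
    split_ifs with h1 h2 h3 <;> simp [*] <;> omega

-- A's penalising loop over enumerate is a map (invariant: the prefix is already done).
lemma penA (bases : String) (cfn : Int) (target : List Char) (pg : List (Int × Int)) :
    ∀ (pre : List Int),
    (PySem.List.enumerate pg (pre.length : Int)).foldl (pvPenalize bases cfn target)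
        (pre ++ pg.map (fun _ => 0)) =
      pre ++ pg.map (fun p => if pvCodon bases p.2 = target then -cfn else 0) := by
  induction pg with
  | nil => simp [PySem.List.enumerate]
  | cons p rest ih =>
    intro pre
    rw [PySem.List.enumerate_cons]
    simp only [List.foldl_cons, List.map_cons, pvPenalize]
    have hnat : ((pre.length : Int)).toNat = pre.length := by omega
    by_cases h : pvCodon bases p.2 = target
    · simp only [h, if_true, hnat]
      have hmod : (pre ++ (0 : Int) :: rest.map (fun _ => 0)).modify pre.length (· - cfn)
          = (pre ++ [0 - cfn]) ++ rest.map (fun _ => 0) := by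
        rw [List.modify_eq_set_getElem?]
        · simp [List.set_append_right]
      have := ih (pre ++ [0 - cfn])
      simp only [List.length_append, List.length_singleton] at this
      push_cast at this
      rw [hmod, this]
      simp
    · simp only [if_neg h]
      have := ih (pre ++ [0])
      simp only [List.length_append, List.length_singleton] at this
      push_cast at this
      rw [show pre ++ (0:Int) :: rest.map (fun _ => 0) = (pre ++ [0]) ++ rest.map (fun _ => 0) by simp,
          this]
      simp

-- B's indexing pass produces exactly the three position lists.
lemma scanB (bases : String) (pg : List (Int × Int)) : ∀ (n : Int) (A G T : List Int),
    (PySem.List.enumerate pg n).foldl (pvScan bases) (A, G, T) =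
      (A ++ pvIdxs (pg.map (fun p => pvCodon bases p.2)) ['T','A','A'] n,
       G ++ pvIdxs (pg.map (fun p => pvCodon bases p.2)) ['T','G','A'] n,
       T ++ pvIdxs (pg.map (fun p => pvCodon bases p.2)) ['T','A','G'] n) := by
  induction pg with
  | nil => simp [PySem.List.enumerate, pvIdxs]
  | cons p rest ih =>
    intro n A G T
    rw [PySem.List.enumerate_cons]
    simp only [List.foldl_cons, List.map_cons, pvScan, pvIdxs,
      show "TAA".toList = ['T','A','A'] from rfl,
      show "TAG".toList = ['T','A','G'] from rfl,
      show "TGA".toList = ['T','G','A'] from rfl]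
    split_ifs with h1 h2 h3 <;> simp_all

-- B's scatter loop over the position list of `key` is the same map.
lemma scatterB (bases : String) (cfn : Int) (key : List Char) (pg : List (Int × Int)) :
    ∀ (pre : List Int),
    (pvIdxs (pg.map (fun p => pvCodon bases p.2)) key (pre.length : Int)).foldl
        (fun o i => o.set i.toNat (-cfn)) (pre ++ pg.map (fun _ => 0)) =
      pre ++ pg.map (fun p => if pvCodon bases p.2 = key then -cfn else 0) := by
  induction pg with
  | nil => simp [pvIdxs]
  | cons p rest ih =>
    intro pre
    simp only [List.map_cons, pvIdxs]
    have hnat : ((pre.length : Int)).toNat = pre.length := by omega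
    by_cases h : pvCodon bases p.2 = key
    · simp only [h, if_true, List.foldl_cons, hnat]
      have hset : (pre ++ (0 : Int) :: rest.map (fun _ => 0)).set pre.length (-cfn)
          = (pre ++ [-cfn]) ++ rest.map (fun _ => 0) := by
        rw [List.set_append_right] <;> simp
      have := ih (pre ++ [-cfn])
      simp only [List.length_append, List.length_singleton] at this
      push_cast at this
      rw [hset, this]
      simp
    · simp only [if_neg h]
      have := ih (pre ++ [0])
      simp only [List.length_append, List.length_singleton] at this
      push_cast at this
      rw [show pre ++ (0:Int) :: rest.map (fun _ => 0) = (pre ++ [0]) ++ rest.map (fun _ => 0) by simp,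
          this]
      simp

-- ===== VERDICT (by name: the statement is the Claim_ definition above) =====
theorem stop_distribution_spec : Claim_equal_stop_distribution := by
  intro pg bases cfn _
  unfold Spec_stop_distribution stop_distribution stop_distribution_alt
  simp only [show "TAA".toList = ['T','A','A'] from rfl,
             show "TAG".toList = ['T','A','G'] from rfl,
             show "TGA".toList = ['T','G','A'] from rfl]
  have hcnt := countA bases pg 0 0 0
  have hscan := scanB bases pg 0 [] [] []
  simp only [List.nil_append, zero_add] at hcnt hscan
  rw [hcnt, hscan]
  have hpen := fun target => penA bases cfn target pg []
  have hsct := fun key => scatterB bases cfn key pg []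
  simp only [List.nil_append, List.length_nil, Nat.cast_zero] at hpen hsct
  simp only [pvIdxs_length]
  split_ifs <;> (try (exfalso; omega)) <;> rw [hpen, hsct]
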